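-- pv_equiv track=rewrite | github.com/kogriv/ytd | ytd/utils.py | find_best_quality_match
-- ===== SOURCE A (Python) =====
-- from typing import Any, Mapping, Callable, Optional
--
-- def find_best_quality_match(
--     available_heights: list[int],
--     target_height: Optional[int],
--     strategy: str = "econom",
-- ) -> Optional[int]:
--     """Найти наилучшее соответствие качества для видео.
--
--     Стратегии:
--       - "econom" (рекомендуется): сначала максимальное ≤ target, если нет — минимальное ≥ target
--       - "rich": сначала максимальное ≥ target, если нет — максимальное ≤ target
--
--     Args:
--         available_heights: Список доступных высот (разрешений) для видео
--         target_height: Целевая высота (например, 720 для 720p), None для лучшего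
--         strategy: "econom" | "rich"
--
--     Returns:
--         Выбранная высота или None если нет подходящих
--     """
--     if not available_heights:
--         return None
--
--     # Если цель не указана - вернуть максимальное
--     if target_height is None:
--         return max(available_heights)
--
--     # Точное совпадение
--     if target_height in available_heights:
--         return target_height
--
--     # Списки ниже/выше цели
--     lower = [h for h in available_heights if h <= target_height]
--     higher = [h for h in available_heights if h >= target_height]
--
--     if strategy == "rich":
--         # Сначала максимальное ≥ target (самое высокое из доступных выше/равно)
--         if higher:
--             return max(higher)
--         # Иначе максимальное ≤ target
--         if lower:
--             return max(lower)
--         return None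
--
--     # По умолчанию "econom":
--     # Сначала максимальное ≤ target
--     if lower:
--         return max(lower)
--     # Иначе минимальное ≥ target
--     if higher:
--         return min(higher)
--     return None
-- ===== SOURCE B (Python) =====
-- from typing import Optional
--
--
-- def find_best_quality_match(
--     available_heights: list[int],
--     target_height: Optional[int],
--     strategy: str = "econom",
-- ) -> Optional[int]:
--     if not available_heights:
--         return None
--     if target_height is None:
--         return max(available_heights)
--     if target_height in available_heights:
--         return target_height
--     if strategy == "rich":
--         # prefer heights >= target (closest first = largest), then the largest below
--         key = lambda h: ((0 if target_height <= h else 1), target_height - h)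
--     else:
--         # econom: prefer the largest height <= target, then the smallest above
--         key = lambda h: ((0, target_height - h) if h <= target_height
--                          else (1, h - target_height))
--     return min(available_heights, key=key)
-- ===== Notes on version B (the rewrite author's own statement) =====
-- stated objective: simpler
-- what changed: Replaced the two filtered lists (lower/higher) and the four-way max/min branch logic with a single min() over the input keyed by a (preference-group, distance) tuple encoding the strategy.
import Mathlib
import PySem

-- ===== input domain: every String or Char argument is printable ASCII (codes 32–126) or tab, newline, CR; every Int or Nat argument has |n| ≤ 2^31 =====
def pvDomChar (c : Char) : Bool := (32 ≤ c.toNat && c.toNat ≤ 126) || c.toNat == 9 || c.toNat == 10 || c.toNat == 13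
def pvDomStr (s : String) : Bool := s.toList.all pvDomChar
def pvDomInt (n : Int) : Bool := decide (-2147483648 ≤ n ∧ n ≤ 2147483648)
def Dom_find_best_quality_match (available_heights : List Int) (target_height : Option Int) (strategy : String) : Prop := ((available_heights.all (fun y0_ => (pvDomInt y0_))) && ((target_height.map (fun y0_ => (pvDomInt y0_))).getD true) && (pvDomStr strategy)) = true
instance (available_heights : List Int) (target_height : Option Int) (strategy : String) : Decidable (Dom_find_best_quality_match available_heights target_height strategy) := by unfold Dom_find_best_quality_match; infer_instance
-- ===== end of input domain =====

-- B replaces A's lower/higher filtered lists and max/min branch ladder by a single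
-- keyed minimum over the input (objective: simpler, same O(n) cost).


-- ===== PORT A =====
def find_best_quality_match (available_heights : List Int) (target_height : Option Int) (strategy : String) : Option Int :=
  if available_heights = [] then none
  else
    match target_height with
    | none => PySem.List.max? available_heights (fun y => y)
    | some t =>
      if t ∈ available_heights then some t
      else
        if strategy = "rich" then
          if available_heights.filter (fun h => decide (t ≤ h)) ≠ [] then
            PySem.List.max? (available_heights.filter (fun h => decide (t ≤ h))) (fun y => y)
          else if available_heights.filter (fun h => decide (h ≤ t)) ≠ [] then
            PySem.List.max? (available_heights.filter (fun h => decide (h ≤ t))) (fun y => y)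
          else none
        else
          if available_heights.filter (fun h => decide (h ≤ t)) ≠ [] then
            PySem.List.max? (available_heights.filter (fun h => decide (h ≤ t))) (fun y => y)
          else if available_heights.filter (fun h => decide (t ≤ h)) ≠ [] then
            PySem.List.min? (available_heights.filter (fun h => decide (t ≤ h))) (fun y => y)
          else none

-- ===== PORT B =====
def find_best_quality_match_alt (available_heights : List Int) (target_height : Option Int) (strategy : String) : Option Int :=
  if available_heights = [] then none
  else
    match target_height with
    | none => PySem.List.max? available_heights (fun y => y)
    | some t =>
      if t ∈ available_heights then some t
      else if strategy = "rich" then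
        PySem.List.min2? available_heights
          (fun h => if t ≤ h then (0 : Int) else 1) (fun h => t - h)
      else
        PySem.List.min2? available_heights
          (fun h => if h ≤ t then (0 : Int) else 1)
          (fun h => if h ≤ t then t - h else h - t)

-- ===== PRECONDITION & SPEC =====
def Spec_find_best_quality_match (available_heights : List Int) (target_height : Option Int) (strategy : String) (out : Option Int) : Prop := out = find_best_quality_match_alt available_heights target_height strategy
instance (available_heights : List Int) (target_height : Option Int) (strategy : String) (out : Option Int) : Decidable (Spec_find_best_quality_match available_heights target_height strategy out) := by unfold Spec_find_best_quality_match; infer_instance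

-- ===== CLAIM (what is proved, stated in full; the proofs are below) =====
def Claim_equal_find_best_quality_match : Prop := ∀ (available_heights : List Int) (target_height : Option Int) (strategy : String), Dom_find_best_quality_match available_heights target_height strategy → Spec_find_best_quality_match available_heights target_height strategy (find_best_quality_match available_heights target_height strategy)

-- ===== LEMMAS AND PROOFS =====

def pvBest (k1 k2 : Int → Int) (m y : Int) : Int :=
  if k1 y < k1 m ∨ (¬ k1 m < k1 y ∧ k2 y < k2 m) then y else m

def pvLe (k1 k2 : Int → Int) (a b : Int) : Prop :=
  k1 a < k1 b ∨ (k1 a = k1 b ∧ k2 a ≤ k2 b)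

lemma pvLe_trans (k1 k2 : Int → Int) (a b c : Int)
    (h1 : pvLe k1 k2 a b) (h2 : pvLe k1 k2 b c) : pvLe k1 k2 a c := by
  unfold pvLe at *; omega

lemma pvBest_le_left (k1 k2 : Int → Int) (x z : Int) :
    pvLe k1 k2 (pvBest k1 k2 x z) x := by
  unfold pvBest pvLe; split <;> omega

lemma pvBest_le_right (k1 k2 : Int → Int) (x z : Int) :
    pvLe k1 k2 (pvBest k1 k2 x z) z := by
  unfold pvBest pvLe; split <;> omega

def pvStep (k1 k2 : Int → Int) : Option Int → Int → Option Int := fun acc y =>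
  match acc with
  | none => some y
  | some m => some (pvBest k1 k2 m y)

lemma min2_eq_foldl (k1 k2 : Int → Int) (x : Int) (xs : List Int) :
    PySem.List.min2? (x :: xs) k1 k2 = some (xs.foldl (pvBest k1 k2) x) := by
  have bridge : PySem.List.min2? (x :: xs) k1 k2 = (x :: xs).foldl (pvStep k1 k2) none := by
    unfold PySem.List.min2? pvStep
    congr 1
    funext acc y
    cases acc with
    | none => rfl
    | some m =>
      by_cases hc : k1 y < k1 m ∨ (¬ k1 m < k1 y ∧ k2 y < k2 m)
      · have hb : (decide (k1 y < k1 m) || !decide (k1 m < k1 y) && decide (k2 y < k2 m)) = true := by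
          simp only [Bool.or_eq_true, Bool.and_eq_true, Bool.not_eq_true', decide_eq_true_eq,
            decide_eq_false_iff_not]
          tauto
        simp only [hb, if_true, pvBest, if_pos hc]
      · have hb : (decide (k1 y < k1 m) || !decide (k1 m < k1 y) && decide (k2 y < k2 m)) = false := by
          simp only [Bool.or_eq_false_iff, Bool.and_eq_false_iff, Bool.not_eq_false',
            decide_eq_false_iff_not, decide_eq_true_eq]
          tauto
        simp only [hb, Bool.false_eq_true, if_false, pvBest, if_neg hc]
  rw [bridge, List.foldl_cons]
  show List.foldl (pvStep k1 k2) (some x) xs = _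
  clear bridge
  induction xs generalizing x with
  | nil => rfl
  | cons z t ih =>
    simp only [List.foldl_cons]
    exact ih (pvBest k1 k2 x z)

lemma foldl_best_mem (k1 k2 : Int → Int) (x : Int) (xs : List Int) :
    xs.foldl (pvBest k1 k2) x ∈ x :: xs := by
  induction xs generalizing x with
  | nil => simp
  | cons z t ih =>
    simp only [List.foldl_cons]
    have h := ih (pvBest k1 k2 x z)
    have hxz : pvBest k1 k2 x z = x ∨ pvBest k1 k2 x z = z := by
      unfold pvBest; split
      · right; rfl
      · left; rfl
    simp only [List.mem_cons] at h ⊢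
    rcases h with h | h
    · rw [h]; tauto
    · tauto

lemma foldl_best_min (k1 k2 : Int → Int) (x : Int) (xs : List Int) :
    ∀ y ∈ x :: xs, pvLe k1 k2 (xs.foldl (pvBest k1 k2) x) y := by
  induction xs generalizing x with
  | nil =>
    intro y hy; simp at hy; subst hy
    simp only [List.foldl_nil]; unfold pvLe; omega
  | cons z t ih =>
    intro y hy
    simp only [List.foldl_cons]
    have hm := ih (pvBest k1 k2 x z) (pvBest k1 k2 x z) (by simp)
    simp only [List.mem_cons] at hy
    rcases hy with rfl | rfl | hy
    · exact pvLe_trans _ _ _ _ _ hm (pvBest_le_left k1 k2 y z)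
    · exact pvLe_trans _ _ _ _ _ hm (pvBest_le_right k1 k2 x y)
    · exact ih (pvBest k1 k2 x z) y (by simp [hy])

lemma min2_eq_of_min (k1 k2 : Int → Int) (xs : List Int) (a : Int) (ha : a ∈ xs)
    (hmin : ∀ y ∈ xs, pvLe k1 k2 a y)
    (hinj : ∀ x ∈ xs, ∀ y ∈ xs, k1 x = k1 y → k2 x = k2 y → x = y) :
    PySem.List.min2? xs k1 k2 = some a := by
  cases xs with
  | nil => simp at ha
  | cons x t =>
    rw [min2_eq_foldl]
    have hmem := foldl_best_mem k1 k2 x t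
    have h1 := foldl_best_min k1 k2 x t a ha
    have h2 := hmin _ hmem
    unfold pvLe at h1 h2
    have : List.foldl (pvBest k1 k2) x t = a := hinj _ hmem _ ha (by omega) (by omega)
    rw [this]

-- ===== VERDICT =====
-- In every branch A returns a member of the list that is minimal for B's lexicographic
-- key; the key is injective on the list, so B's keyed minimum is exactly A's choice.
theorem find_best_quality_match_spec : Claim_equal_find_best_quality_match := by
  intro hs t? strat _
  unfold Spec_find_best_quality_match find_best_quality_match find_best_quality_match_alt
  by_cases hnil : hs = []
  · simp [hnil]
  · simp only [if_neg hnil]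
    cases t? with
    | none => rfl
    | some t =>
      by_cases hmem : t ∈ hs
      · simp [hmem]
      · simp only [if_neg hmem]
        by_cases hstrat : strat = "rich"
        · -- rich
          simp only [if_pos hstrat]
          by_cases hh : hs.filter (fun h => decide (t ≤ h)) ≠ []
          · rw [if_pos hh]
            rcases hx : PySem.List.max? (hs.filter (fun h => decide (t ≤ h))) (fun y => y) with _ | a
            · exact absurd (((PySem.List.max?_eq_none_iff _ _).mp hx)) hh
            · have haF := PySem.List.max?_mem hx
              have hmax := PySem.List.max?_isMax hx
              have ha : a ∈ hs := (List.mem_filter.mp haF).1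
              have hat : t ≤ a := by simpa using (List.mem_filter.mp haF).2
              refine (min2_eq_of_min _ _ _ a ha ?_ ?_).symm
              · intro y hy
                by_cases hyt : t ≤ y
                · have := hmax y (List.mem_filter.mpr ⟨hy, by simpa using hyt⟩)
                  simp only [pvLe]
                  split_ifs <;> omega
                · simp only [pvLe]
                  split_ifs <;> omega
              · intro u _ v _ _ h2
                omega
          · rw [if_neg hh]
            push Not at hh
            have hall : ∀ y ∈ hs, ¬ t ≤ y := by
              intro y hy hyt
              have : y ∈ hs.filter (fun h => decide (t ≤ h)) := List.mem_filter.mpr ⟨hy, by simpa using hyt⟩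
              simp [hh] at this
            have hl : hs.filter (fun h => decide (h ≤ t)) ≠ [] := by
              cases hs with
              | nil => exact absurd rfl hnil
              | cons x xs =>
                have : x ∈ List.filter (fun h => decide (h ≤ t)) (x :: xs) :=
                  List.mem_filter.mpr ⟨by simp, by simpa using le_of_lt (lt_of_not_ge (fun h => hall x (by simp) (le_of_lt (lt_of_le_of_ne h (by intro he; exact hmem (he ▸ by simp))))))⟩
                intro hcon
                rw [hcon] at this
                simp at this
            rw [if_pos hl]
            rcases hx : PySem.List.max? (hs.filter (fun h => decide (h ≤ t))) (fun y => y) with _ | a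
            · exact absurd (((PySem.List.max?_eq_none_iff _ _).mp hx)) hl
            · have haF := PySem.List.max?_mem hx
              have hmax := PySem.List.max?_isMax hx
              have ha : a ∈ hs := (List.mem_filter.mp haF).1
              refine (min2_eq_of_min _ _ _ a ha ?_ ?_).symm
              · intro y hy
                have hyt := hall y hy
                have hat := hall a ha
                have := hmax y (List.mem_filter.mpr ⟨hy, by simpa using le_of_not_ge hyt⟩)
                simp only [pvLe]
                split_ifs <;> omega
              · intro u _ v _ _ h2
                omega
        · -- econom
          simp only [if_neg hstrat]
          by_cases hl : hs.filter (fun h => decide (h ≤ t)) ≠ []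
          · rw [if_pos hl]
            rcases hx : PySem.List.max? (hs.filter (fun h => decide (h ≤ t))) (fun y => y) with _ | a
            · exact absurd (((PySem.List.max?_eq_none_iff _ _).mp hx)) hl
            · have haF := PySem.List.max?_mem hx
              have hmax := PySem.List.max?_isMax hx
              have ha : a ∈ hs := (List.mem_filter.mp haF).1
              have hat : a ≤ t := by simpa using (List.mem_filter.mp haF).2
              refine (min2_eq_of_min _ _ _ a ha ?_ ?_).symm
              · intro y hy
                by_cases hyt : y ≤ t
                · have := hmax y (List.mem_filter.mpr ⟨hy, by simpa using hyt⟩)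
                  simp only [pvLe]
                  split_ifs <;> omega
                · simp only [pvLe]
                  split_ifs <;> omega
              · intro u hu v hv h1 h2
                simp only at h1 h2
                split_ifs at h1 h2 <;> omega
          · rw [if_neg hl]
            push Not at hl
            have hall : ∀ y ∈ hs, ¬ y ≤ t := by
              intro y hy hyt
              have : y ∈ hs.filter (fun h => decide (h ≤ t)) := List.mem_filter.mpr ⟨hy, by simpa using hyt⟩
              simp [hl] at this
            have hh : hs.filter (fun h => decide (t ≤ h)) ≠ [] := by
              cases hs with
              | nil => exact absurd rfl hnil
              | cons x xs =>
                have : x ∈ List.filter (fun h => decide (t ≤ h)) (x :: xs) :=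
                  List.mem_filter.mpr ⟨by simp, by simpa using le_of_not_ge (hall x (by simp))⟩
                intro hcon
                rw [hcon] at this
                simp at this
            rw [if_pos hh]
            rcases hx : PySem.List.min? (hs.filter (fun h => decide (t ≤ h))) (fun y => y) with _ | a
            · exact absurd (((PySem.List.min?_eq_none_iff _ _).mp hx)) hh
            · have haF := PySem.List.min?_mem hx
              have hmin := PySem.List.min?_isMin hx
              have ha : a ∈ hs := (List.mem_filter.mp haF).1
              refine (min2_eq_of_min _ _ _ a ha ?_ ?_).symm
              · intro y hy
                have hyt := hall y hy
                have hat := hall a ha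
                have := hmin y (List.mem_filter.mpr ⟨hy, by simpa using le_of_not_ge hyt⟩)
                simp only [pvLe]
                split_ifs <;> omega
              · intro u hu v hv h1 h2
                simp only at h1 h2
                split_ifs at h1 h2 <;> omega
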